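-- pv_equiv track=rewrite | github.com/OTSUGUA14/Programacion1 | Trabajo Practico 6/ejercicio del 1 al 5.py | tupla
-- ===== SOURCE A (Python) =====
-- def tupla(list):
--     list_new=[]
--     found=[]
--     aux=0
--     for i in range(len(list)):
--         tuppla_add=()
--         cant=0
--         if list[i] in found:
--             continue
--         else:
--             found.append(list[i])
--             cant=0
--             for j in range(len(list)):
--                 if list[i]==list[j]:
--                     aux+=i
--                     cant+=1
--             list_new.insert(aux,(list[i],cant))
--
--     return list_new
-- ===== SOURCE B (Python) =====
-- def tupla(list):
--     list_new = []
--     for x in list: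
--         for k in range(len(list_new)):
--             if list_new[k][0] == x:
--                 list_new[k] = (x, list_new[k][1] + 1)
--                 break
--         else:
--             list_new.append((x, 1))
--     return list_new
-- ===== Notes on version B (the rewrite author's own statement) =====
-- stated objective: alternative
-- what changed: Single accumulating pass that keeps (value,count) tuples up to date in first-occurrence order, replacing A's per-unique full rescan of the whole input and its list.insert at an ever-growing accumulated index (which always degenerates to an append).
import Mathlib
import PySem

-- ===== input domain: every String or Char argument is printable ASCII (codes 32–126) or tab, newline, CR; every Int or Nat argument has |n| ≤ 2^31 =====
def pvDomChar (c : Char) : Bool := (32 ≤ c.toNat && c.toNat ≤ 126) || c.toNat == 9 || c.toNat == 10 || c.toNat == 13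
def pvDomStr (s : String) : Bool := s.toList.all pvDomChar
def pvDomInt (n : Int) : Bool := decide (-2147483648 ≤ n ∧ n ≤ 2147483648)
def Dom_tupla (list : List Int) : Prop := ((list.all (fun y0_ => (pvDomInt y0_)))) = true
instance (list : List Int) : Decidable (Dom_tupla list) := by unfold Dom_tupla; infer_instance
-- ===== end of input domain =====

-- B replaces A's nested "pick a unique value, rescan the whole input to count it" loop
-- by a single accumulating pass that keeps (value, count) tuples up to date in
-- first-occurrence order (A's growing insertion index always degenerates to an append).

-- ===== PORT A =====
-- loop body of A's outer 'for i in range(len(list))' loop; state = (list_new, found, aux)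
def tuplaStep (list : List Int) (s : List (Int × Int) × List Int × Int) (i : Int) :
    List (Int × Int) × List Int × Int :=
  let xi := PySem.List.pyGetD list i 0
  if s.2.1.contains xi then s
  else
    let found := s.2.1 ++ [xi]
    -- inner 'for j in range(len(list))' loop over state (aux, cant), starting with cant = 0
    let p := (PySem.List.pyRange 0 (list.length : Int) 1).foldl
      (fun (p : Int × Int) j =>
        if xi == PySem.List.pyGetD list j 0 then (p.1 + i, p.2 + 1) else p)
      (s.2.2, 0)
    (PySem.List.insert s.1 p.1 (xi, p.2), found, p.1)

def tupla (list : List Int) : List (Int × Int) :=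
  ((PySem.List.pyRange 0 (list.length : Int) 1).foldl (tuplaStep list) ([], ([], 0))).1

-- ===== PORT B =====
-- B's inner scan: first tuple with matching value gets its count bumped, else append (x, 1)
def bumpTupla (out : List (Int × Int)) (x : Int) : List (Int × Int) :=
  match out with
  | [] => [(x, 1)]
  | (y, c) :: rest => if y == x then (x, c + 1) :: rest else (y, c) :: bumpTupla rest x

def tupla_alt (list : List Int) : List (Int × Int) :=
  list.foldl bumpTupla []

-- ===== PRECONDITION & SPEC =====
def Spec_tupla (list : List Int) (out : List (Int × Int)) : Prop := out = tupla_alt list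
instance (list : List Int) (out : List (Int × Int)) : Decidable (Spec_tupla list out) := by unfold Spec_tupla; infer_instance

-- ===== CLAIM (what is proved, stated in full; the proofs are below) =====
def Claim_equal_tupla : Prop := ∀ (list : List Int), Dom_tupla list → Spec_tupla list (tupla list)

-- ===== LEMMAS AND PROOFS =====

-- the common normal form: distinct values in first-occurrence order, each with its total count
def pvTarget (l : List Int) : List (Int × Int) :=
  (PySem.Set.ofList l).map (fun v => (v, (l.count v : Int)))

-- triangular numbers, the lower bound A's accumulated insertion index always satisfies
def pvTri : Nat → Nat
  | 0 => 0
  | n + 1 => pvTri n + n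

theorem pvInsert_ge {α : Type} (xs : List α) (a : Int) (v : α) (h : (xs.length : Int) ≤ a) :
    PySem.List.insert xs a v = xs ++ [v] := by
  have h0 : ¬ a < 0 := by omega
  have h1 : min a (xs.length : Int) = (xs.length : Int) := min_eq_right h
  simp only [PySem.List.insert, PySem.List.sliceIndices, if_neg h0]
  norm_num [h1]

theorem pvOfList_append_singleton (p : List Int) (x : Int) :
    PySem.Set.ofList (p ++ [x]) = PySem.Set.add (PySem.Set.ofList p) x := by
  rw [PySem.Set.ofList_eq_foldl, PySem.Set.ofList_eq_foldl, List.foldl_append]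
  rfl

theorem pvBump_map (ks : List Int) (g : Int → Int) (x : Int)
    (hnd : ks.Nodup) (hg : x ∉ ks → g x = 0) :
    bumpTupla (ks.map (fun v => (v, g v))) x =
      (PySem.Set.add ks x).map (fun v => (v, if v = x then g v + 1 else g v)) := by
  induction ks with
  | nil =>
      simp [bumpTupla, PySem.Set.add, PySem.Set.contains, hg (by simp)]
  | cons y ks ih =>
      by_cases hyx : y = x
      · subst hyx
        have hy : y ∉ ks := (List.nodup_cons.mp hnd).1
        have hc : PySem.Set.contains (y :: ks) y = true := by
          simp [PySem.Set.contains]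
        have hmap : List.map (fun v => (v, if v = y then g v + 1 else g v)) ks =
            List.map (fun v => (v, g v)) ks :=
          List.map_congr_left (fun v hv => by
            have : v ≠ y := fun h => hy (h ▸ hv)
            simp [this])
        simp [bumpTupla, PySem.Set.add, hc, hmap]
      · have hnd' : ks.Nodup := (List.nodup_cons.mp hnd).2
        have hg' : x ∉ ks → g x = 0 := fun h => hg (by simp [hyx, h, Ne.symm hyx])
        have hb : (y == x) = false := by simp [hyx]
        simp only [List.map_cons, bumpTupla, hb]
        rw [if_neg (by simp)]
        rw [ih hnd' hg']
        have hadd : PySem.Set.add (y :: ks) x = y :: PySem.Set.add ks x := by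
          by_cases hm : x ∈ ks
          · simp [PySem.Set.add, PySem.Set.contains, hm, Ne.symm hyx]
          · simp [PySem.Set.add, PySem.Set.contains, hm, Ne.symm hyx]
        rw [hadd]
        simp [hyx]

theorem pvB_loop : ∀ (rest p : List Int),
    rest.foldl bumpTupla ((PySem.Set.ofList p).map (fun v => (v, (p.count v : Int)))) =
      pvTarget (p ++ rest) := by
  intro rest
  induction rest with
  | nil => intro p; simp [pvTarget]
  | cons x rest ih =>
      intro p
      rw [List.foldl_cons]
      have hstep : bumpTupla ((PySem.Set.ofList p).map (fun v => (v, (p.count v : Int)))) x =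
          (PySem.Set.ofList (p ++ [x])).map (fun v => (v, ((p ++ [x]).count v : Int))) := by
        rw [pvBump_map (PySem.Set.ofList p) _ x (PySem.Set.nodup_ofList p)
          (by intro h; simp [PySem.Set.mem_ofList] at h
              simp [List.count_eq_zero.mpr h])]
        rw [pvOfList_append_singleton]
        apply List.map_congr_left
        intro v _
        by_cases hvx : v = x
        · subst hvx; simp [List.count_append]
        · simp [hvx, List.count_append, List.count_singleton, Ne.symm hvx]
      rw [hstep, ih (p ++ [x])]
      simp

theorem pvTupla_alt_eq (l : List Int) : tupla_alt l = pvTarget l := by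
  have := pvB_loop l []
  simpa [tupla_alt, PySem.Set.ofList] using this

theorem pvInner_fold (xs : List Int) (v i : Int) : ∀ (a c : Int),
    xs.foldl (fun p x => if v == x then (p.1 + i, p.2 + 1) else p) (a, c) =
      (a + i * (xs.count v : Int), c + (xs.count v : Int)) := by
  induction xs with
  | nil => intro a c; simp
  | cons y xs ih =>
      intro a c
      rw [List.foldl_cons]
      by_cases hvy : v = y
      · have hb : (v == y) = true := by simp [hvy]
        rw [if_pos hb, ih]
        have hcc : ((y :: xs).count v : Int) = (xs.count v : Int) + 1 := by
          rw [hvy]; simp [List.count_cons]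
        rw [hcc]
        simp only [Prod.mk.injEq]
        constructor <;> ring
      · have hb : (v == y) = false := by simp [hvy]
        rw [if_neg (by simp [hb]), ih]
        have hcc : ((y :: xs).count v : Int) = (xs.count v : Int) := by
          simp [List.count_cons, Ne.symm hvy]
        rw [hcc]

theorem pvA_loop (l : List Int) : ∀ (m j : Nat), j + m = l.length →
    ∀ (found : List Int) (aux : Int),
    found = PySem.Set.ofList (l.take j) →
    found.length ≤ j →
    (pvTri found.length : Int) ≤ aux →
    ((List.range' j m).foldl (fun s (k : Nat) => tuplaStep l s (k : Int))
        (found.map (fun v => (v, (l.count v : Int))), found, aux)).1 = pvTarget l := by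
  intro m
  induction m with
  | zero =>
      intro j hjm found aux hf _ _
      have : j = l.length := by omega
      subst this
      simp [hf, List.take_length, pvTarget]
  | succ m ih =>
      intro j hjm found aux hf hk ha
      have hj : j < l.length := by omega
      rw [List.range'_succ, List.foldl_cons]
      have hxi : PySem.List.pyGetD l (j : Int) 0 = l[j] := by
        rw [PySem.List.pyGetD_natCast]
        exact List.getD_eq_getElem l 0 hj
      have htake : l.take (j + 1) = l.take j ++ [l[j]] := by
        rw [List.take_succ]
        simp [List.getElem?_eq_getElem hj]
      by_cases hmem : l[j] ∈ found
      · -- duplicate value: state unchanged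
        have hc : found.contains l[j] = true := by simp; exact hmem
        have hstep : tuplaStep l (found.map (fun v => (v, (l.count v : Int))), found, aux) (j : Int)
            = (found.map (fun v => (v, (l.count v : Int))), found, aux) := by
          simp [tuplaStep, hxi, hmem]
        rw [hstep]
        apply ih (j + 1) (by omega) found aux _ (by omega) ha
        rw [htake, pvOfList_append_singleton, ← hf]
        have hcc : PySem.Set.contains found l[j] = true := by
          simp [PySem.Set.contains]; exact hmem
        simp [PySem.Set.add, hcc]
        exact hmem
      · -- new value: count it over the whole list and append
        have hc : found.contains l[j] = false := by simp; exact hmem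
        have hcnt1 : 1 ≤ (l.count l[j] : Int) := by
          have : 0 < l.count l[j] := List.count_pos_iff.mpr (l.getElem_mem hj)
          omega
        have hinner : (PySem.List.pyRange 0 (l.length : Int) 1).foldl
            (fun (p : Int × Int) j' =>
              if l[j] == PySem.List.pyGetD l j' 0 then (p.1 + (j : Int), p.2 + 1) else p)
            (aux, 0) = (aux + (j : Int) * (l.count l[j] : Int), (l.count l[j] : Int)) := by
          rw [PySem.List.foldl_pyRange_zero_pyGetD' l 0
            (fun p x => if l[j] == x then (p.1 + (j : Int), p.2 + 1) else p) (aux, 0)]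
          rw [pvInner_fold]
          simp
        have hlen : ((found.map (fun v => (v, (l.count v : Int)))).length : Int)
            ≤ aux + (j : Int) * (l.count l[j] : Int) := by
          have h1 : (found.length : Int) ≤ (j : Int) := by exact_mod_cast hk
          have h2 : (0 : Int) ≤ (pvTri found.length : Int) := by positivity
          have h3 : (j : Int) ≤ (j : Int) * (l.count l[j] : Int) :=
            le_mul_of_one_le_right (by positivity) hcnt1
          simp only [List.length_map]
          omega
        have hstep : tuplaStep l (found.map (fun v => (v, (l.count v : Int))), found, aux) (j : Int)
            = ((found ++ [l[j]]).map (fun v => (v, (l.count v : Int))), found ++ [l[j]],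
               aux + (j : Int) * (l.count l[j] : Int)) := by
          simp only [tuplaStep, hxi, hc]
          rw [if_neg (by simp)]
          rw [hinner, pvInsert_ge _ _ _ hlen]
          simp
        rw [hstep]
        refine ih (j + 1) (by omega) (found ++ [l[j]]) _ ?_ (by simp; omega) ?_
        · rw [htake, pvOfList_append_singleton, ← hf]
          have hcc : PySem.Set.contains found l[j] = false := by
            simp [PySem.Set.contains]; exact hmem
          simp [PySem.Set.add, hcc]
          exact hmem
        · -- aux + j*cnt ≥ tri (k+1) = tri k + k
          have h1 : (found.length : Int) ≤ (j : Int) := by exact_mod_cast hk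
          have h3 : (j : Int) ≤ (j : Int) * (l.count l[j] : Int) :=
            le_mul_of_one_le_right (by positivity) hcnt1
          have htri : (pvTri (found ++ [l[j]]).length : Int)
              = (pvTri found.length : Int) + (found.length : Int) := by
            simp [pvTri]
          rw [htri]
          omega

theorem pvTupla_eq (l : List Int) : tupla l = pvTarget l := by
  unfold tupla
  rw [PySem.List.pyRange_one]
  have : ((l.length : Int) - 0).toNat = l.length := by simp
  rw [this, List.foldl_map]
  simp only [zero_add]
  rw [List.range_eq_range']
  exact pvA_loop l l.length 0 (by omega) [] 0 (by simp [PySem.Set.ofList]) (by simp)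
    (by simp [pvTri])

-- ===== VERDICT (by name: the statement is the Claim_ definition above) =====
theorem tupla_spec : Claim_equal_tupla := by
  intro l _
  unfold Spec_tupla
  rw [pvTupla_eq, pvTupla_alt_eq]
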